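-- pv_equiv track=rewrite | github.com/NathanielSlw/fullname2username | fullname2username.py | generate_usernames
-- ===== SOURCE A (Python) =====
-- ALL_FORMATS = {
--     # No separator
--     "fnln":     lambda f, l, _: f"{f}{l}",
--     "filn":     lambda f, l, _: f"{f[0]}{l}",
--     "fnli":     lambda f, l, _: f"{f}{l[0]}",
--     "fili":     lambda f, l, _: f"{f[0]}{l[0]}",
--     "lnfn":     lambda f, l, _: f"{l}{f}",
--     "lnfi":     lambda f, l, _: f"{l}{f[0]}",
--     "lifn":     lambda f, l, _: f"{l[0]}{f}",
--     "lifi":     lambda f, l, _: f"{l[0]}{f[0]}",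
--     "fn":       lambda f, l, _: f,
--     "ln":       lambda f, l, _: l,
--
--     # Dot
--     "fn.ln":    lambda f, l, _: f"{f}.{l}",
--     "fi.ln":    lambda f, l, _: f"{f[0]}.{l}",
--     "fn.li":    lambda f, l, _: f"{f}.{l[0]}",
--     "fi.li":    lambda f, l, _: f"{f[0]}.{l[0]}",
--     "ln.fn":    lambda f, l, _: f"{l}.{f}",
--     "ln.fi":    lambda f, l, _: f"{l}.{f[0]}",
--     "li.fn":    lambda f, l, _: f"{l[0]}.{f}",
--     "li.fi":    lambda f, l, _: f"{l[0]}.{f[0]}",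
--
--     # Dash
--     "fn-ln":    lambda f, l, _: f"{f}-{l}",
--     "fi-ln":    lambda f, l, _: f"{f[0]}-{l}",
--     "fn-li":    lambda f, l, _: f"{f}-{l[0]}",
--     "fi-li":    lambda f, l, _: f"{f[0]}-{l[0]}",
--     "ln-fn":    lambda f, l, _: f"{l}-{f}",
--     "ln-fi":    lambda f, l, _: f"{l}-{f[0]}",
--     "li-fn":    lambda f, l, _: f"{l[0]}-{f}",
--     "li-fi":    lambda f, l, _: f"{l[0]}-{f[0]}",
--
--     # Underscore
--     "fn_ln":    lambda f, l, _: f"{f}_{l}",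
--     "fi_ln":    lambda f, l, _: f"{f[0]}_{l}",
--     "fn_li":    lambda f, l, _: f"{f}_{l[0]}",
--     "fi_li":    lambda f, l, _: f"{f[0]}_{l[0]}",
--     "ln_fn":    lambda f, l, _: f"{l}_{f}",
--     "ln_fi":    lambda f, l, _: f"{l}_{f[0]}",
--     "li_fn":    lambda f, l, _: f"{l[0]}_{f}",
--     "li_fi":    lambda f, l, _: f"{l[0]}_{f[0]}",
-- }
--
-- def generate_usernames(fullname, formats_to_generate):
--     try:
--         firstname, lastname = fullname.strip().split()
--     except ValueError:
--         return {}
--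
--     firstname = firstname.lower()
--     lastname = lastname.lower()
--     middle = firstname[1] if len(firstname) > 1 else ""
--
--     usernames = {}
--     for key in formats_to_generate:
--         if key not in ALL_FORMATS:
--             continue
--         result = ALL_FORMATS[key](firstname, lastname, middle)
--         if result:
--             usernames[f"{key}.txt"] = result
--     return usernames
-- ===== SOURCE B (Python) =====
-- def generate_usernames(fullname, formats_to_generate):
--     parts = fullname.strip().split()
--     if len(parts) != 2:
--         return {}
--     first, last = parts[0].lower(), parts[1].lower()
--
--     def tok(a, b):
--         return a in "fl" and b in "ni"
--
--     def part(a, b):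
--         name = first if a == "f" else last
--         return name if b == "n" else name[:1]
--
--     out = {}
--     for key in formats_to_generate:
--         n = len(key)
--         if n == 2:
--             if key == "fn":
--                 out[key + ".txt"] = first
--             elif key == "ln":
--                 out[key + ".txt"] = last
--         elif n == 4:
--             if tok(key[0], key[1]) and tok(key[2], key[3]) and key[0] != key[2]:
--                 out[key + ".txt"] = part(key[0], key[1]) + part(key[2], key[3])
--         elif n == 5:
--             if key[2] in "._-" and tok(key[0], key[1]) and tok(key[3], key[4]) and key[0] != key[3]:
--                 out[key + ".txt"] = part(key[0], key[1]) + key[2] + part(key[3], key[4])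
--     return out
-- ===== Notes on version B (the rewrite author's own statement) =====
-- stated objective: idiomatic
-- what changed: Replaces the 34-entry ALL_FORMATS lambda table and its dict lookup by a small parser: each key is validated structurally (lone fn/ln, or two two-char tokens from different names optionally joined by one of . - _) and the username is assembled by decoding the tokens inline.
import Mathlib
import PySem

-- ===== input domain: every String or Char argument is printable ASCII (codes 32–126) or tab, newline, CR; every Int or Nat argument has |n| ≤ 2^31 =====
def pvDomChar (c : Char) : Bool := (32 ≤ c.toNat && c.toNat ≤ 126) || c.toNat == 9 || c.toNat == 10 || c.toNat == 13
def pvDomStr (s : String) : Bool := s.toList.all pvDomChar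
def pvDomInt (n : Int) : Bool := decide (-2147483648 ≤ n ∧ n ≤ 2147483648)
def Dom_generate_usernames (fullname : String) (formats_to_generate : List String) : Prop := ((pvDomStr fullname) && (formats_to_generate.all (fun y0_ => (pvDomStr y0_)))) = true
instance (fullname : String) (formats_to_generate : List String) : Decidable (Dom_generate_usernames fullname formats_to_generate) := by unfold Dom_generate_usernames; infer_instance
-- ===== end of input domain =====

-- B replaces A's 34-entry lambda table with a structural key parser that decodes each
-- format key inline (objective: idiomatic). Equivalence is about the return value.

-- ===== PORT A =====
-- name[0] as used by A's lambdas; the names come from str.split() so the IndexError arm is unreachable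
def pvIdx0 (s : String) : String :=
  match PySem.Str.pyGet? s 0 with
  | some c => String.ofList [c]
  | none => ""

-- ALL_FORMATS: the dict literal, each lambda transliterated
def pvALL_FORMATS : PySem.Dict String (String → String → String → String) := ⟨[
  ("fnln", fun f l _ => f ++ l),
  ("filn", fun f l _ => pvIdx0 f ++ l),
  ("fnli", fun f l _ => f ++ pvIdx0 l),
  ("fili", fun f l _ => pvIdx0 f ++ pvIdx0 l),
  ("lnfn", fun f l _ => l ++ f),
  ("lnfi", fun f l _ => l ++ pvIdx0 f),
  ("lifn", fun f l _ => pvIdx0 l ++ f),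
  ("lifi", fun f l _ => pvIdx0 l ++ pvIdx0 f),
  ("fn", fun f l _ => f),
  ("ln", fun f l _ => l),
  ("fn.ln", fun f l _ => f ++ "." ++ l),
  ("fi.ln", fun f l _ => pvIdx0 f ++ "." ++ l),
  ("fn.li", fun f l _ => f ++ "." ++ pvIdx0 l),
  ("fi.li", fun f l _ => pvIdx0 f ++ "." ++ pvIdx0 l),
  ("ln.fn", fun f l _ => l ++ "." ++ f),
  ("ln.fi", fun f l _ => l ++ "." ++ pvIdx0 f),
  ("li.fn", fun f l _ => pvIdx0 l ++ "." ++ f),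
  ("li.fi", fun f l _ => pvIdx0 l ++ "." ++ pvIdx0 f),
  ("fn-ln", fun f l _ => f ++ "-" ++ l),
  ("fi-ln", fun f l _ => pvIdx0 f ++ "-" ++ l),
  ("fn-li", fun f l _ => f ++ "-" ++ pvIdx0 l),
  ("fi-li", fun f l _ => pvIdx0 f ++ "-" ++ pvIdx0 l),
  ("ln-fn", fun f l _ => l ++ "-" ++ f),
  ("ln-fi", fun f l _ => l ++ "-" ++ pvIdx0 f),
  ("li-fn", fun f l _ => pvIdx0 l ++ "-" ++ f),
  ("li-fi", fun f l _ => pvIdx0 l ++ "-" ++ pvIdx0 f),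
  ("fn_ln", fun f l _ => f ++ "_" ++ l),
  ("fi_ln", fun f l _ => pvIdx0 f ++ "_" ++ l),
  ("fn_li", fun f l _ => f ++ "_" ++ pvIdx0 l),
  ("fi_li", fun f l _ => pvIdx0 f ++ "_" ++ pvIdx0 l),
  ("ln_fn", fun f l _ => l ++ "_" ++ f),
  ("ln_fi", fun f l _ => l ++ "_" ++ pvIdx0 f),
  ("li_fn", fun f l _ => pvIdx0 l ++ "_" ++ f),
  ("li_fi", fun f l _ => pvIdx0 l ++ "_" ++ pvIdx0 f)]⟩

-- the body of A's for-loop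
def pvStepA (firstname lastname middle : String) (d : PySem.Dict String String) (key : String) :
    PySem.Dict String String :=
  match pvALL_FORMATS.get? key with
  | none => d
  | some fmt =>
      let result := fmt firstname lastname middle
      if result != "" then d.insert (key ++ ".txt") result else d

def generate_usernames (fullname : String) (formats_to_generate : List String) : List (String × String) :=
  match PySem.Str.split₀ (PySem.Str.strip fullname) with
  | [fn0, ln0] =>
      let firstname := PySem.Str.lower fn0
      let lastname := PySem.Str.lower ln0
      let middle := if 1 < PySem.Str.len firstname then
          (match PySem.Str.pyGet? firstname 1 with | some c => String.ofList [c] | none => "")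
        else ""
      (formats_to_generate.foldl (pvStepA firstname lastname middle) PySem.Dict.empty).items
  | _ => []

-- ===== PORT B =====
-- tok(a, b): a in "fl" and b in "ni"
def pvTok (a b : Char) : Bool := (a == 'f' || a == 'l') && (b == 'n' || b == 'i')

-- part(a, b): pick the name by a, full name or its first character by b (name[:1])
def pvPart (a b : Char) (first last : String) : String :=
  let name := if a == 'f' then first else last
  if b == 'n' then name else PySem.Str.slice name none (some 1)

-- the body of B's for-loop: dispatch on the key's length, then token checks
-- (the indexing key[i] is in range by the length guard, so getD is exact)
def pvStepB (first last : String) (d : PySem.Dict String String) (key : String) :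
    PySem.Dict String String :=
  let cs := key.toList
  if cs.length = 2 then
    if key == "fn" then d.insert (key ++ ".txt") first
    else if key == "ln" then d.insert (key ++ ".txt") last
    else d
  else if cs.length = 4 then
    let a := cs.getD 0 ' '
    let b := cs.getD 1 ' '
    let c := cs.getD 2 ' '
    let e := cs.getD 3 ' '
    if pvTok a b && pvTok c e && (a != c) then
      d.insert (key ++ ".txt") (pvPart a b first last ++ pvPart c e first last)
    else d
  else if cs.length = 5 then
    let a := cs.getD 0 ' '
    let b := cs.getD 1 ' '
    let s := cs.getD 2 ' '
    let c := cs.getD 3 ' '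
    let e := cs.getD 4 ' '
    if (s == '.' || s == '-' || s == '_') && pvTok a b && pvTok c e && (a != c) then
      d.insert (key ++ ".txt") (pvPart a b first last ++ String.ofList [s] ++ pvPart c e first last)
    else d
  else d

def generate_usernames_alt (fullname : String) (formats_to_generate : List String) : List (String × String) :=
  let parts := PySem.Str.split₀ (PySem.Str.strip fullname)
  if parts.length = 2 then
    let first := PySem.Str.lower (PySem.List.pyGetD parts 0 "")
    let last := PySem.Str.lower (PySem.List.pyGetD parts 1 "")
    (formats_to_generate.foldl (pvStepB first last) PySem.Dict.empty).items
  else []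

-- ===== PRECONDITION & SPEC =====
def Spec_generate_usernames (fullname : String) (formats_to_generate : List String) (out : List (String × String)) : Prop := out = generate_usernames_alt fullname formats_to_generate
instance (fullname : String) (formats_to_generate : List String) (out : List (String × String)) : Decidable (Spec_generate_usernames fullname formats_to_generate out) := by unfold Spec_generate_usernames; infer_instance

-- ===== CLAIM (what is proved, stated in full; the proofs are below) =====
def Claim_equal_generate_usernames : Prop := ∀ (fullname : String) (formats_to_generate : List String), Dom_generate_usernames fullname formats_to_generate → Spec_generate_usernames fullname formats_to_generate (generate_usernames fullname formats_to_generate)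

-- ===== LEMMAS AND PROOFS =====

-- every word produced by str.split() is non-empty
lemma pv_split_go_ne_nil (s : List Char) : ∀ (cur : List Char) (acc : List (List Char)),
    (∀ w ∈ acc, w ≠ []) → ∀ w ∈ PySem.Chars.split₀.go s cur acc, w ≠ [] := by
  induction s with
  | nil =>
      intro cur acc hacc w hw
      rw [PySem.Chars.split₀.go] at hw
      by_cases hc : cur.isEmpty
      · simp [hc] at hw; exact hacc w (by simpa using hw)
      · simp [hc] at hw
        rcases hw with hw | hw
        · exact hacc w hw
        · subst hw
          intro h
          rw [List.reverse_eq_nil_iff] at h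
          simp [h] at hc
  | cons c rest ih =>
      intro cur acc hacc w hw
      rw [PySem.Chars.split₀.go] at hw
      by_cases hsp : PySem.Chars.isspace c
      · by_cases hc : cur.isEmpty
        · simp [hsp, hc] at hw; exact ih [] acc hacc w hw
        · simp [hsp, hc] at hw
          refine ih [] (cur.reverse :: acc) ?_ w hw
          intro v hv
          rcases List.mem_cons.mp hv with hv | hv
          · subst hv
            intro h
            rw [List.reverse_eq_nil_iff] at h
            simp [h] at hc
          · exact hacc v hv
      · simp [hsp] at hw
        exact ih (c :: cur) acc hacc w hw

lemma pv_split_ne_empty {t w : String} (h : w ∈ PySem.Str.split₀ t) : w.toList ≠ [] := by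
  simp [PySem.Str.split₀] at h
  rcases h with ⟨ws, hws, rfl⟩
  have := pv_split_go_ne_nil t.toList [] [] (by simp) ws
    (by simpa [PySem.Chars.split₀] using hws)
  rw [String.toList_ofList]
  exact this

lemma pv_lower_ne_empty {w : String} (hw : w.toList ≠ []) : PySem.Str.lower w ≠ "" := by
  intro h
  apply hw
  have h2 := congrArg String.toList h
  simp [PySem.Str.lower, String.toList_ofList, PySem.Chars.lower] at h2
  simp [h2]

-- A's name[0] equals B's name[:1]
lemma pv_idx0_eq_slice (s : String) : pvIdx0 s = PySem.Str.slice s none (some 1) := by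
  rcases hs : s.toList with _ | ⟨c, cs⟩ <;>
    simp [pvIdx0, pysem, hs, PySem.Str.slice, PySem.List.slice]

lemma pv_append_eq_empty_iff (s t : String) : s ++ t = "" ↔ s = "" ∧ t = "" := by
  constructor
  · intro h
    have h2 := congrArg String.toList h
    rw [String.toList_append] at h2
    rcases List.append_eq_nil_iff.mp h2 with ⟨h3, h4⟩
    exact ⟨String.toList_inj.mp h3, String.toList_inj.mp h4⟩
  · rintro ⟨rfl, rfl⟩; rfl

lemma pv_slice1_ne_empty {s : String} (hs : s ≠ "") : PySem.Str.slice s none (some 1) ≠ "" := by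
  rcases hs2 : s.toList with _ | ⟨c, cs⟩ <;>
    simp_all [PySem.Str.slice, PySem.List.slice, ← String.toList_inj]

-- lookup characterizations of the literal format table, by key length
lemma pv_get_mk_nil (k : String) :
    ({ items := [] } : PySem.Dict String (String → String → String → String)).get? k = none := rfl

-- proof-side restatement of the table lookup as a chain over the key's characters
def pvFindSpec (cs : List Char) : Option (String → String → String → String) :=
  if cs = "fnln".toList then some (fun f l _ => f ++ l)
  else
  if cs = "filn".toList then some (fun f l _ => pvIdx0 f ++ l)
  else
  if cs = "fnli".toList then some (fun f l _ => f ++ pvIdx0 l)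
  else
  if cs = "fili".toList then some (fun f l _ => pvIdx0 f ++ pvIdx0 l)
  else
  if cs = "lnfn".toList then some (fun f l _ => l ++ f)
  else
  if cs = "lnfi".toList then some (fun f l _ => l ++ pvIdx0 f)
  else
  if cs = "lifn".toList then some (fun f l _ => pvIdx0 l ++ f)
  else
  if cs = "lifi".toList then some (fun f l _ => pvIdx0 l ++ pvIdx0 f)
  else
  if cs = "fn".toList then some (fun f l _ => f)
  else
  if cs = "ln".toList then some (fun f l _ => l)
  else
  if cs = "fn.ln".toList then some (fun f l _ => f ++ "." ++ l)
  else
  if cs = "fi.ln".toList then some (fun f l _ => pvIdx0 f ++ "." ++ l)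
  else
  if cs = "fn.li".toList then some (fun f l _ => f ++ "." ++ pvIdx0 l)
  else
  if cs = "fi.li".toList then some (fun f l _ => pvIdx0 f ++ "." ++ pvIdx0 l)
  else
  if cs = "ln.fn".toList then some (fun f l _ => l ++ "." ++ f)
  else
  if cs = "ln.fi".toList then some (fun f l _ => l ++ "." ++ pvIdx0 f)
  else
  if cs = "li.fn".toList then some (fun f l _ => pvIdx0 l ++ "." ++ f)
  else
  if cs = "li.fi".toList then some (fun f l _ => pvIdx0 l ++ "." ++ pvIdx0 f)
  else
  if cs = "fn-ln".toList then some (fun f l _ => f ++ "-" ++ l)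
  else
  if cs = "fi-ln".toList then some (fun f l _ => pvIdx0 f ++ "-" ++ l)
  else
  if cs = "fn-li".toList then some (fun f l _ => f ++ "-" ++ pvIdx0 l)
  else
  if cs = "fi-li".toList then some (fun f l _ => pvIdx0 f ++ "-" ++ pvIdx0 l)
  else
  if cs = "ln-fn".toList then some (fun f l _ => l ++ "-" ++ f)
  else
  if cs = "ln-fi".toList then some (fun f l _ => l ++ "-" ++ pvIdx0 f)
  else
  if cs = "li-fn".toList then some (fun f l _ => pvIdx0 l ++ "-" ++ f)
  else
  if cs = "li-fi".toList then some (fun f l _ => pvIdx0 l ++ "-" ++ pvIdx0 f)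
  else
  if cs = "fn_ln".toList then some (fun f l _ => f ++ "_" ++ l)
  else
  if cs = "fi_ln".toList then some (fun f l _ => pvIdx0 f ++ "_" ++ l)
  else
  if cs = "fn_li".toList then some (fun f l _ => f ++ "_" ++ pvIdx0 l)
  else
  if cs = "fi_li".toList then some (fun f l _ => pvIdx0 f ++ "_" ++ pvIdx0 l)
  else
  if cs = "ln_fn".toList then some (fun f l _ => l ++ "_" ++ f)
  else
  if cs = "ln_fi".toList then some (fun f l _ => l ++ "_" ++ pvIdx0 f)
  else
  if cs = "li_fn".toList then some (fun f l _ => pvIdx0 l ++ "_" ++ f)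
  else
  if cs = "li_fi".toList then some (fun f l _ => pvIdx0 l ++ "_" ++ pvIdx0 f)
  else none

lemma pv_cond_iff (t : String) (cs : List Char) : (t == String.ofList cs) = true ↔ cs = t.toList := by
  rw [beq_iff_eq]
  constructor
  · intro h; rw [h, String.toList_ofList]
  · intro h; rw [h, String.ofList_toList]

lemma pv_get_spec (cs : List Char) : pvALL_FORMATS.get? (String.ofList cs) = pvFindSpec cs := by
  simp only [pvALL_FORMATS, PySem.Dict.get?_mk_cons, pv_get_mk_nil, pv_cond_iff, pvFindSpec]

lemma pv_get2 (a b : Char) : pvALL_FORMATS.get? (String.ofList [a, b]) =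
    if a = 'f' ∧ b = 'n' then some (fun f _ _ => f)
    else if a = 'l' ∧ b = 'n' then some (fun _ l _ => l)
    else none := by
  rw [pv_get_spec]
  simp [pvFindSpec]

lemma pv_get4 (a b c e : Char) : pvALL_FORMATS.get? (String.ofList [a, b, c, e]) =
    if a = 'f' ∧ b = 'n' ∧ c = 'l' ∧ e = 'n' then some (fun f l _ => f ++ l)
    else
    if a = 'f' ∧ b = 'i' ∧ c = 'l' ∧ e = 'n' then some (fun f l _ => pvIdx0 f ++ l)
    else
    if a = 'f' ∧ b = 'n' ∧ c = 'l' ∧ e = 'i' then some (fun f l _ => f ++ pvIdx0 l)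
    else
    if a = 'f' ∧ b = 'i' ∧ c = 'l' ∧ e = 'i' then some (fun f l _ => pvIdx0 f ++ pvIdx0 l)
    else
    if a = 'l' ∧ b = 'n' ∧ c = 'f' ∧ e = 'n' then some (fun f l _ => l ++ f)
    else
    if a = 'l' ∧ b = 'n' ∧ c = 'f' ∧ e = 'i' then some (fun f l _ => l ++ pvIdx0 f)
    else
    if a = 'l' ∧ b = 'i' ∧ c = 'f' ∧ e = 'n' then some (fun f l _ => pvIdx0 l ++ f)
    else
    if a = 'l' ∧ b = 'i' ∧ c = 'f' ∧ e = 'i' then some (fun f l _ => pvIdx0 l ++ pvIdx0 f)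
    else none := by
  rw [pv_get_spec]
  simp [pvFindSpec]

lemma pv_get5 (a b s c e : Char) : pvALL_FORMATS.get? (String.ofList [a, b, s, c, e]) =
    if a = 'f' ∧ b = 'n' ∧ s = '.' ∧ c = 'l' ∧ e = 'n' then some (fun f l _ => f ++ "." ++ l)
    else
    if a = 'f' ∧ b = 'i' ∧ s = '.' ∧ c = 'l' ∧ e = 'n' then some (fun f l _ => pvIdx0 f ++ "." ++ l)
    else
    if a = 'f' ∧ b = 'n' ∧ s = '.' ∧ c = 'l' ∧ e = 'i' then some (fun f l _ => f ++ "." ++ pvIdx0 l)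
    else
    if a = 'f' ∧ b = 'i' ∧ s = '.' ∧ c = 'l' ∧ e = 'i' then some (fun f l _ => pvIdx0 f ++ "." ++ pvIdx0 l)
    else
    if a = 'l' ∧ b = 'n' ∧ s = '.' ∧ c = 'f' ∧ e = 'n' then some (fun f l _ => l ++ "." ++ f)
    else
    if a = 'l' ∧ b = 'n' ∧ s = '.' ∧ c = 'f' ∧ e = 'i' then some (fun f l _ => l ++ "." ++ pvIdx0 f)
    else
    if a = 'l' ∧ b = 'i' ∧ s = '.' ∧ c = 'f' ∧ e = 'n' then some (fun f l _ => pvIdx0 l ++ "." ++ f)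
    else
    if a = 'l' ∧ b = 'i' ∧ s = '.' ∧ c = 'f' ∧ e = 'i' then some (fun f l _ => pvIdx0 l ++ "." ++ pvIdx0 f)
    else
    if a = 'f' ∧ b = 'n' ∧ s = '-' ∧ c = 'l' ∧ e = 'n' then some (fun f l _ => f ++ "-" ++ l)
    else
    if a = 'f' ∧ b = 'i' ∧ s = '-' ∧ c = 'l' ∧ e = 'n' then some (fun f l _ => pvIdx0 f ++ "-" ++ l)
    else
    if a = 'f' ∧ b = 'n' ∧ s = '-' ∧ c = 'l' ∧ e = 'i' then some (fun f l _ => f ++ "-" ++ pvIdx0 l)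
    else
    if a = 'f' ∧ b = 'i' ∧ s = '-' ∧ c = 'l' ∧ e = 'i' then some (fun f l _ => pvIdx0 f ++ "-" ++ pvIdx0 l)
    else
    if a = 'l' ∧ b = 'n' ∧ s = '-' ∧ c = 'f' ∧ e = 'n' then some (fun f l _ => l ++ "-" ++ f)
    else
    if a = 'l' ∧ b = 'n' ∧ s = '-' ∧ c = 'f' ∧ e = 'i' then some (fun f l _ => l ++ "-" ++ pvIdx0 f)
    else
    if a = 'l' ∧ b = 'i' ∧ s = '-' ∧ c = 'f' ∧ e = 'n' then some (fun f l _ => pvIdx0 l ++ "-" ++ f)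
    else
    if a = 'l' ∧ b = 'i' ∧ s = '-' ∧ c = 'f' ∧ e = 'i' then some (fun f l _ => pvIdx0 l ++ "-" ++ pvIdx0 f)
    else
    if a = 'f' ∧ b = 'n' ∧ s = '_' ∧ c = 'l' ∧ e = 'n' then some (fun f l _ => f ++ "_" ++ l)
    else
    if a = 'f' ∧ b = 'i' ∧ s = '_' ∧ c = 'l' ∧ e = 'n' then some (fun f l _ => pvIdx0 f ++ "_" ++ l)
    else
    if a = 'f' ∧ b = 'n' ∧ s = '_' ∧ c = 'l' ∧ e = 'i' then some (fun f l _ => f ++ "_" ++ pvIdx0 l)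
    else
    if a = 'f' ∧ b = 'i' ∧ s = '_' ∧ c = 'l' ∧ e = 'i' then some (fun f l _ => pvIdx0 f ++ "_" ++ pvIdx0 l)
    else
    if a = 'l' ∧ b = 'n' ∧ s = '_' ∧ c = 'f' ∧ e = 'n' then some (fun f l _ => l ++ "_" ++ f)
    else
    if a = 'l' ∧ b = 'n' ∧ s = '_' ∧ c = 'f' ∧ e = 'i' then some (fun f l _ => l ++ "_" ++ pvIdx0 f)
    else
    if a = 'l' ∧ b = 'i' ∧ s = '_' ∧ c = 'f' ∧ e = 'n' then some (fun f l _ => pvIdx0 l ++ "_" ++ f)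
    else
    if a = 'l' ∧ b = 'i' ∧ s = '_' ∧ c = 'f' ∧ e = 'i' then some (fun f l _ => pvIdx0 l ++ "_" ++ pvIdx0 f)
    else none := by
  rw [pv_get_spec]
  simp [pvFindSpec]

-- shape characterizations of B's loop body
lemma pv_stepB2 (first last : String) (d : PySem.Dict String String) (a b : Char) :
    pvStepB first last d (String.ofList [a, b]) =
    if a = 'f' ∧ b = 'n' then d.insert (String.ofList [a, b] ++ ".txt") first
    else if a = 'l' ∧ b = 'n' then d.insert (String.ofList [a, b] ++ ".txt") last
    else d := by
  simp only [pvStepB, String.toList_ofList]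
  split_ifs <;> simp_all [String.ext_iff]

lemma pv_stepB4 (first last : String) (d : PySem.Dict String String) (a b c e : Char) :
    pvStepB first last d (String.ofList [a, b, c, e]) =
    if ((a = 'f' ∨ a = 'l') ∧ (b = 'n' ∨ b = 'i')) ∧ ((c = 'f' ∨ c = 'l') ∧ (e = 'n' ∨ e = 'i')) ∧ ¬a = c
    then d.insert (String.ofList [a, b, c, e] ++ ".txt") (pvPart a b first last ++ pvPart c e first last)
    else d := by
  have hiff : (pvTok a b && pvTok c e && (a != c)) = true ↔
      (((a = 'f' ∨ a = 'l') ∧ (b = 'n' ∨ b = 'i')) ∧ ((c = 'f' ∨ c = 'l') ∧ (e = 'n' ∨ e = 'i')) ∧ ¬a = c) := by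
    simp [pvTok]; tauto
  by_cases h : ((a = 'f' ∨ a = 'l') ∧ (b = 'n' ∨ b = 'i')) ∧ ((c = 'f' ∨ c = 'l') ∧ (e = 'n' ∨ e = 'i')) ∧ ¬a = c
  · rw [if_pos h]
    simp [pvStepB, String.toList_ofList, hiff.mpr h]
  · rw [if_neg h]
    have hb : ¬ ((pvTok a b && pvTok c e && (a != c)) = true) := fun hh => h (hiff.mp hh)
    simp [pvStepB, String.toList_ofList, hb]

lemma pv_stepB5 (first last : String) (d : PySem.Dict String String) (a b s c e : Char) :
    pvStepB first last d (String.ofList [a, b, s, c, e]) =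
    if (s = '.' ∨ s = '-' ∨ s = '_') ∧ ((a = 'f' ∨ a = 'l') ∧ (b = 'n' ∨ b = 'i')) ∧ ((c = 'f' ∨ c = 'l') ∧ (e = 'n' ∨ e = 'i')) ∧ ¬a = c
    then d.insert (String.ofList [a, b, s, c, e] ++ ".txt")
      (pvPart a b first last ++ String.ofList [s] ++ pvPart c e first last)
    else d := by
  have hiff : ((s == '.' || s == '-' || s == '_') && pvTok a b && pvTok c e && (a != c)) = true ↔
      ((s = '.' ∨ s = '-' ∨ s = '_') ∧ ((a = 'f' ∨ a = 'l') ∧ (b = 'n' ∨ b = 'i')) ∧ ((c = 'f' ∨ c = 'l') ∧ (e = 'n' ∨ e = 'i')) ∧ ¬a = c) := by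
    simp [pvTok]; tauto
  by_cases h : (s = '.' ∨ s = '-' ∨ s = '_') ∧ ((a = 'f' ∨ a = 'l') ∧ (b = 'n' ∨ b = 'i')) ∧ ((c = 'f' ∨ c = 'l') ∧ (e = 'n' ∨ e = 'i')) ∧ ¬a = c
  · rw [if_pos h]
    simp [pvStepB, String.toList_ofList, hiff.mpr h]
  · rw [if_neg h]
    have hb : ¬ (((s == '.' || s == '-' || s == '_') && pvTok a b && pvTok c e && (a != c)) = true) :=
      fun hh => h (hiff.mp hh)
    simp [pvStepB, String.toList_ofList, hb]

lemma pv_stepB_other (first last : String) (d : PySem.Dict String String) (cs : List Char)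
    (h2 : cs.length ≠ 2) (h4 : cs.length ≠ 4) (h5 : cs.length ≠ 5) :
    pvStepB first last d (String.ofList cs) = d := by
  simp [pvStepB, String.toList_ofList, h2, h4, h5]

-- the two loop bodies agree whenever both names are non-empty
set_option maxHeartbeats 1000000 in
lemma pv_step_eq (f l m : String) (hf : f ≠ "") (hl : l ≠ "")
    (d : PySem.Dict String String) (key : String) :
    pvStepA f l m d key = pvStepB f l d key := by
  have hf1 : PySem.Str.slice f none (some 1) ≠ "" := pv_slice1_ne_empty hf
  have hl1 : PySem.Str.slice l none (some 1) ≠ "" := pv_slice1_ne_empty hl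
  suffices h : ∀ cs : List Char,
      pvStepA f l m d (String.ofList cs) = pvStepB f l d (String.ofList cs) by
    have hk : String.ofList key.toList = key := String.ofList_toList
    rw [← hk]; exact h _
  intro cs
  match cs with
  | [] | [a] | [a, b, c] | a :: b :: c :: e :: x :: y :: rest =>
      rw [pv_stepB_other _ _ _ _
        (by simp only [List.length_cons, List.length_nil]; omega)
        (by simp only [List.length_cons, List.length_nil]; omega)
        (by simp only [List.length_cons, List.length_nil]; omega)]
      simp [pvStepA, pvALL_FORMATS, PySem.Dict.get?_mk_cons, pv_get_mk_nil,
        String.ext_iff, String.toList_ofList]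
  | [a, b] =>
      simp only [pvStepA, pv_get2]
      rw [pv_stepB2]
      split_ifs with h1 h2 <;> simp_all [pv_append_eq_empty_iff, bne_iff_ne, hf, hl]
  | [a, b, c, e] =>
      simp only [pvStepA, pv_get4]
      rw [pv_stepB4]
      by_cases hB : ((a = 'f' ∨ a = 'l') ∧ (b = 'n' ∨ b = 'i')) ∧ ((c = 'f' ∨ c = 'l') ∧ (e = 'n' ∨ e = 'i')) ∧ ¬a = c
      · rw [if_pos hB]
        obtain ⟨⟨ha, hb⟩, ⟨hc, he⟩, hac⟩ := hB
        rcases ha with rfl | rfl <;> rcases hb with rfl | rfl <;>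
          rcases hc with rfl | rfl <;> rcases he with rfl | rfl <;>
          simp_all [pvPart, pv_idx0_eq_slice, pv_append_eq_empty_iff, bne_iff_ne,
            hf, hl, hf1, hl1]
      · rw [if_neg hB,
          if_neg (fun hh => by obtain ⟨rfl, rfl, rfl, rfl⟩ := hh; exact hB (by decide)),
          if_neg (fun hh => by obtain ⟨rfl, rfl, rfl, rfl⟩ := hh; exact hB (by decide)),
          if_neg (fun hh => by obtain ⟨rfl, rfl, rfl, rfl⟩ := hh; exact hB (by decide)),
          if_neg (fun hh => by obtain ⟨rfl, rfl, rfl, rfl⟩ := hh; exact hB (by decide)),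
          if_neg (fun hh => by obtain ⟨rfl, rfl, rfl, rfl⟩ := hh; exact hB (by decide)),
          if_neg (fun hh => by obtain ⟨rfl, rfl, rfl, rfl⟩ := hh; exact hB (by decide)),
          if_neg (fun hh => by obtain ⟨rfl, rfl, rfl, rfl⟩ := hh; exact hB (by decide)),
          if_neg (fun hh => by obtain ⟨rfl, rfl, rfl, rfl⟩ := hh; exact hB (by decide))]
  | [a, b, s, c, e] =>
      simp only [pvStepA, pv_get5]
      rw [pv_stepB5]
      by_cases hB : (s = '.' ∨ s = '-' ∨ s = '_') ∧ ((a = 'f' ∨ a = 'l') ∧ (b = 'n' ∨ b = 'i')) ∧ ((c = 'f' ∨ c = 'l') ∧ (e = 'n' ∨ e = 'i')) ∧ ¬a = c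
      · rw [if_pos hB]
        obtain ⟨hs, ⟨ha, hb⟩, ⟨hc, he⟩, hac⟩ := hB
        rcases hs with rfl | rfl | rfl <;> rcases ha with rfl | rfl <;>
          rcases hb with rfl | rfl <;> rcases hc with rfl | rfl <;>
          rcases he with rfl | rfl <;>
          simp_all [pvPart, pv_idx0_eq_slice, pv_append_eq_empty_iff, bne_iff_ne,
            hf, hl, hf1, hl1]
      · rw [if_neg hB,
          if_neg (fun hh => by obtain ⟨rfl, rfl, rfl, rfl, rfl⟩ := hh; exact hB (by decide)),
          if_neg (fun hh => by obtain ⟨rfl, rfl, rfl, rfl, rfl⟩ := hh; exact hB (by decide)),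
          if_neg (fun hh => by obtain ⟨rfl, rfl, rfl, rfl, rfl⟩ := hh; exact hB (by decide)),
          if_neg (fun hh => by obtain ⟨rfl, rfl, rfl, rfl, rfl⟩ := hh; exact hB (by decide)),
          if_neg (fun hh => by obtain ⟨rfl, rfl, rfl, rfl, rfl⟩ := hh; exact hB (by decide)),
          if_neg (fun hh => by obtain ⟨rfl, rfl, rfl, rfl, rfl⟩ := hh; exact hB (by decide)),
          if_neg (fun hh => by obtain ⟨rfl, rfl, rfl, rfl, rfl⟩ := hh; exact hB (by decide)),
          if_neg (fun hh => by obtain ⟨rfl, rfl, rfl, rfl, rfl⟩ := hh; exact hB (by decide)),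
          if_neg (fun hh => by obtain ⟨rfl, rfl, rfl, rfl, rfl⟩ := hh; exact hB (by decide)),
          if_neg (fun hh => by obtain ⟨rfl, rfl, rfl, rfl, rfl⟩ := hh; exact hB (by decide)),
          if_neg (fun hh => by obtain ⟨rfl, rfl, rfl, rfl, rfl⟩ := hh; exact hB (by decide)),
          if_neg (fun hh => by obtain ⟨rfl, rfl, rfl, rfl, rfl⟩ := hh; exact hB (by decide)),
          if_neg (fun hh => by obtain ⟨rfl, rfl, rfl, rfl, rfl⟩ := hh; exact hB (by decide)),
          if_neg (fun hh => by obtain ⟨rfl, rfl, rfl, rfl, rfl⟩ := hh; exact hB (by decide)),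
          if_neg (fun hh => by obtain ⟨rfl, rfl, rfl, rfl, rfl⟩ := hh; exact hB (by decide)),
          if_neg (fun hh => by obtain ⟨rfl, rfl, rfl, rfl, rfl⟩ := hh; exact hB (by decide)),
          if_neg (fun hh => by obtain ⟨rfl, rfl, rfl, rfl, rfl⟩ := hh; exact hB (by decide)),
          if_neg (fun hh => by obtain ⟨rfl, rfl, rfl, rfl, rfl⟩ := hh; exact hB (by decide)),
          if_neg (fun hh => by obtain ⟨rfl, rfl, rfl, rfl, rfl⟩ := hh; exact hB (by decide)),
          if_neg (fun hh => by obtain ⟨rfl, rfl, rfl, rfl, rfl⟩ := hh; exact hB (by decide)),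
          if_neg (fun hh => by obtain ⟨rfl, rfl, rfl, rfl, rfl⟩ := hh; exact hB (by decide)),
          if_neg (fun hh => by obtain ⟨rfl, rfl, rfl, rfl, rfl⟩ := hh; exact hB (by decide)),
          if_neg (fun hh => by obtain ⟨rfl, rfl, rfl, rfl, rfl⟩ := hh; exact hB (by decide)),
          if_neg (fun hh => by obtain ⟨rfl, rfl, rfl, rfl, rfl⟩ := hh; exact hB (by decide))]
-- ===== VERDICT (by name: the statement is the Claim_ definition above) =====
theorem generate_usernames_spec : Claim_equal_generate_usernames := by
  intro fullname formats _
  unfold Spec_generate_usernames generate_usernames generate_usernames_alt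
  rcases hws : PySem.Str.split₀ (PySem.Str.strip fullname) with _ | ⟨w1, _ | ⟨w2, _ | ⟨w3, rest⟩⟩⟩
  · rfl
  · rfl
  · have h1 : w1 ∈ PySem.Str.split₀ (PySem.Str.strip fullname) := by rw [hws]; simp
    have h2 : w2 ∈ PySem.Str.split₀ (PySem.Str.strip fullname) := by rw [hws]; simp
    have hf := pv_lower_ne_empty (pv_split_ne_empty h1)
    have hl := pv_lower_ne_empty (pv_split_ne_empty h2)
    show (List.foldl (pvStepA (PySem.Str.lower w1) (PySem.Str.lower w2)
          (if 1 < PySem.Str.len (PySem.Str.lower w1) then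
            (match PySem.Str.pyGet? (PySem.Str.lower w1) 1 with
              | some c => String.ofList [c] | none => "")
          else "")) PySem.Dict.empty formats).items =
        (List.foldl (pvStepB (PySem.Str.lower (PySem.List.pyGetD [w1, w2] 0 ""))
          (PySem.Str.lower (PySem.List.pyGetD [w1, w2] 1 ""))) PySem.Dict.empty formats).items
    congr 1
    apply PySem.List.foldl_congr_mem
    intro d key _
    rw [show PySem.List.pyGetD [w1, w2] (0 : Int) "" = w1 from rfl,
      show PySem.List.pyGetD [w1, w2] (1 : Int) "" = w2 from rfl]
    exact pv_step_eq (PySem.Str.lower w1) (PySem.Str.lower w2) _ hf hl d key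
  · rfl
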